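-- pv_equiv track=rewrite | github.com/JASONOUYANG0304/stock_crawler | 專案.py | returnStrDayList
-- ===== SOURCE A (Python) =====
-- def returnStrDayList(startYear, startMonth, endYear, endMonth, day = "01"):
--     result = []
--     if startYear == endYear:
--         for month in range(startMonth, endMonth+1):
--             month = str(month)
--             if len(month)==1:
--                 month = "0" + month
--             result.append(str(startYear)+month+day)
--         return result
--     for year in range(startYear, endYear+1):
--         if year == startYear:
--             for month in range(startMonth, 13):
--                 month = str(month)
--                 if len(month)==1:
--                     month = "0" + month
--                 result.append(str(year)+month+day)
--         elif year == endYear: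
--             for month in range(1,endMonth+1):
--                 month = str(month)
--                 if len(month)==1:
--                     month = "0" + month
--                 result.append(str(year)+month+day)
--         else:
--             for month in range(1,13):
--                 month = str(month)
--                 if len(month)==1:
--                     month = "0" + month
--                 result.append(str(year)+month+day)
--     return result
-- ===== SOURCE B (Python) =====
-- def _pad(m):
--     s = str(m)
--     return "0" + s if len(s) == 1 else s
--
-- def returnStrDayList(startYear, startMonth, endYear, endMonth, day="01"):
--     # divide and conquer on the year span: split at the midpoint year, the left
--     # half ends at month 12 and the right half starts at month 1
--     if startYear > endYear:
--         return []
--     if startYear == endYear: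
--         return [str(startYear) + _pad(m) + day for m in range(startMonth, endMonth + 1)]
--     mid = (startYear + endYear) // 2
--     return (returnStrDayList(startYear, startMonth, mid, 12, day)
--             + returnStrDayList(mid + 1, 1, endYear, endMonth, day))
-- ===== Notes on version B (the rewrite author's own statement) =====
-- stated objective: alternative
-- what changed: Replaces A's single iterative accumulator with its per-year three-way branch dispatch by divide-and-conquer recursion on the year span: split at the midpoint year, build each half's date list (single-year base case as a comprehension) and concatenate.
import Mathlib
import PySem

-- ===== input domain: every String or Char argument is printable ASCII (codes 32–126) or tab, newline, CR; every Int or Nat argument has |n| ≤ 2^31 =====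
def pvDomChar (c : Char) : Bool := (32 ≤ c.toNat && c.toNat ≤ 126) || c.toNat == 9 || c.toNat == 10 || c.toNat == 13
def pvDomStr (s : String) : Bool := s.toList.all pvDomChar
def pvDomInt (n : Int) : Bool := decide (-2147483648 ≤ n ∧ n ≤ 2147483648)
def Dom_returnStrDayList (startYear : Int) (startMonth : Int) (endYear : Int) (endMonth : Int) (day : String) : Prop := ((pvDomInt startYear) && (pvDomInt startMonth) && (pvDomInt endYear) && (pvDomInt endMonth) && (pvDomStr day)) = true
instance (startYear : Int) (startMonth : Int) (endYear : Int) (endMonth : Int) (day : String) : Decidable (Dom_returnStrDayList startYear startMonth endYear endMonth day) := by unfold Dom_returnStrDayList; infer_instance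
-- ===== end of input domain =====

-- B replaces A's iterative accumulator with per-year branch dispatch by divide-and-conquer
-- recursion on the year span, splitting at the midpoint year (objective: alternative).

-- ===== PORT A =====
-- literal transliteration of A: special case + three separate inner append loops, pad inlined each time
def returnStrDayList (startYear : Int) (startMonth : Int) (endYear : Int) (endMonth : Int) (day : String) : List String :=
  if startYear = endYear then
    (PySem.List.pyRange startMonth (endMonth + 1) 1).foldl (fun result month =>
      let m := PySem.Int.toStr month
      let m := if PySem.Str.len m = 1 then "0" ++ m else m
      result ++ [PySem.Int.toStr startYear ++ m ++ day]) []
  else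
    (PySem.List.pyRange startYear (endYear + 1) 1).foldl (fun result year =>
      if year = startYear then
        (PySem.List.pyRange startMonth 13 1).foldl (fun result month =>
          let m := PySem.Int.toStr month
          let m := if PySem.Str.len m = 1 then "0" ++ m else m
          result ++ [PySem.Int.toStr year ++ m ++ day]) result
      else if year = endYear then
        (PySem.List.pyRange 1 (endMonth + 1) 1).foldl (fun result month =>
          let m := PySem.Int.toStr month
          let m := if PySem.Str.len m = 1 then "0" ++ m else m
          result ++ [PySem.Int.toStr year ++ m ++ day]) result
      else
        (PySem.List.pyRange 1 13 1).foldl (fun result month =>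
          let m := PySem.Int.toStr month
          let m := if PySem.Str.len m = 1 then "0" ++ m else m
          result ++ [PySem.Int.toStr year ++ m ++ day]) result) []

-- ===== PORT B =====
-- helper _pad of Source B
def pvPad (m : Int) : String :=
  let s := PySem.Int.toStr m
  if PySem.Str.len s = 1 then "0" ++ s else s

-- divide and conquer on the year span, splitting at the midpoint year (as in Source B)
def returnStrDayList_alt (startYear : Int) (startMonth : Int) (endYear : Int) (endMonth : Int) (day : String) : List String :=
  if _h1 : endYear < startYear then []
  else if _h2 : startYear = endYear then
    (PySem.List.pyRange startMonth (endMonth + 1) 1).map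
      (fun m => PySem.Int.toStr startYear ++ pvPad m ++ day)
  else
    let mid := PySem.Int.floordiv (startYear + endYear) 2
    returnStrDayList_alt startYear startMonth mid 12 day
      ++ returnStrDayList_alt (mid + 1) 1 endYear endMonth day
termination_by (endYear - startYear).toNat
decreasing_by
  all_goals
    rw [PySem.Int.floordiv_eq_ediv_of_pos (by norm_num : (0:Int) < 2)]
    omega

-- ===== PRECONDITION & SPEC =====
def Spec_returnStrDayList (startYear : Int) (startMonth : Int) (endYear : Int) (endMonth : Int) (day : String) (out : List String) : Prop := out = returnStrDayList_alt startYear startMonth endYear endMonth day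
instance (startYear : Int) (startMonth : Int) (endYear : Int) (endMonth : Int) (day : String) (out : List String) : Decidable (Spec_returnStrDayList startYear startMonth endYear endMonth day out) := by unfold Spec_returnStrDayList; infer_instance

-- ===== CLAIM =====
def Claim_equal_returnStrDayList : Prop := ∀ (startYear : Int) (startMonth : Int) (endYear : Int) (endMonth : Int) (day : String), Dom_returnStrDayList startYear startMonth endYear endMonth day → Spec_returnStrDayList startYear startMonth endYear endMonth day (returnStrDayList startYear startMonth endYear endMonth day)

-- ===== LEMMAS AND PROOFS =====

-- the per-year month segment both programs build
def pvSeg (y lo hi : Int) (day : String) : List String :=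
  (PySem.List.pyRange lo hi 1).map (fun m => PySem.Int.toStr y ++ pvPad m ++ day)

-- common characterisation: one segment per year, first year starts at sm, last ends at em
def pvSpec (sy sm ey em : Int) (day : String) : List String :=
  (PySem.List.pyRange sy (ey + 1) 1).flatMap
    (fun y => pvSeg y (if y = sy then sm else 1) ((if y = ey then em else 12) + 1) day)

-- A's inner append-loops are maps (cited: foldl_append_singleton_eq_map)
theorem segA (y lo hi : Int) (day : String) (acc : List String) :
    (PySem.List.pyRange lo hi 1).foldl (fun result month =>
      let m := PySem.Int.toStr month
      let m := if PySem.Str.len m = 1 then "0" ++ m else m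
      result ++ [PySem.Int.toStr y ++ m ++ day]) acc = acc ++ pvSeg y lo hi day := by
  simpa [pvSeg, pvPad] using
    PySem.List.foldl_append_singleton_eq_map
      (l := PySem.List.pyRange lo hi 1)
      (f := fun m => PySem.Int.toStr y ++ pvPad m ++ day) (acc := acc)

-- B equals the common characterisation (strong induction on the year span)
theorem alt_eq_spec (n : ℕ) : ∀ (sy sm ey em : Int) (day : String), (ey - sy).toNat ≤ n →
    returnStrDayList_alt sy sm ey em day = pvSpec sy sm ey em day := by
  induction n with
  | zero =>
    intro sy sm ey em day hn
    rw [returnStrDayList_alt]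
    by_cases h1 : ey < sy
    · rw [dif_pos h1]
      rw [pvSpec, PySem.List.pyRange_one_eq_nil (by omega), List.flatMap_nil]
    · have h2 : sy = ey := by omega
      rw [dif_neg h1, dif_pos h2]
      subst h2
      rw [pvSpec, PySem.List.pyRange_one_singleton]
      simp [pvSeg]
  | succ k ih =>
    intro sy sm ey em day hn
    rw [returnStrDayList_alt]
    by_cases h1 : ey < sy
    · rw [dif_pos h1]
      rw [pvSpec, PySem.List.pyRange_one_eq_nil (by omega), List.flatMap_nil]
    · by_cases h2 : sy = ey
      · rw [dif_neg h1, dif_pos h2]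
        subst h2
        rw [pvSpec, PySem.List.pyRange_one_singleton]
        simp [pvSeg]
      · rw [dif_neg h1, dif_neg h2]
        have hlt : sy < ey := by omega
        have hmid : sy ≤ PySem.Int.floordiv (sy + ey) 2 ∧
            PySem.Int.floordiv (sy + ey) 2 < ey := by
          rw [PySem.Int.floordiv_eq_ediv_of_pos (by norm_num : (0:Int) < 2)]
          omega
        obtain ⟨hm1, hm2⟩ := hmid
        show returnStrDayList_alt sy sm (PySem.Int.floordiv (sy + ey) 2) 12 day
            ++ returnStrDayList_alt (PySem.Int.floordiv (sy + ey) 2 + 1) 1 ey em day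
          = pvSpec sy sm ey em day
        rw [ih sy sm _ 12 day (by omega), ih _ 1 ey em day (by omega)]
        rw [pvSpec, pvSpec, pvSpec]
        rw [PySem.List.pyRange_one_append sy (PySem.Int.floordiv (sy + ey) 2 + 1)
          (ey + 1) (by omega) (by omega), List.flatMap_append]
        congr 1
        · apply List.flatMap_congr
          intro y hy
          rw [PySem.List.mem_pyRange_one] at hy
          rw [if_neg (by omega : ¬ y = ey), ite_self]
        · apply List.flatMap_congr
          intro y hy
          rw [PySem.List.mem_pyRange_one] at hy
          rw [if_neg (by omega : ¬ y = sy), ite_self]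

-- ===== VERDICT =====
theorem returnStrDayList_spec : Claim_equal_returnStrDayList := by
  intro sy sm ey em day _
  unfold Spec_returnStrDayList returnStrDayList
  rw [alt_eq_spec (ey - sy).toNat sy sm ey em day le_rfl]
  by_cases h : sy = ey
  · subst h
    rw [if_pos rfl, segA, pvSpec, PySem.List.pyRange_one_singleton]
    simp
  · rw [if_neg h]
    by_cases hle : sy ≤ ey
    · have hstep :
          (PySem.List.pyRange sy (ey + 1) 1).foldl (fun result year =>
            if year = sy then
              (PySem.List.pyRange sm 13 1).foldl (fun result month =>
                let m := PySem.Int.toStr month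
                let m := if PySem.Str.len m = 1 then "0" ++ m else m
                result ++ [PySem.Int.toStr year ++ m ++ day]) result
            else if year = ey then
              (PySem.List.pyRange 1 (em + 1) 1).foldl (fun result month =>
                let m := PySem.Int.toStr month
                let m := if PySem.Str.len m = 1 then "0" ++ m else m
                result ++ [PySem.Int.toStr year ++ m ++ day]) result
            else
              (PySem.List.pyRange 1 13 1).foldl (fun result month =>
                let m := PySem.Int.toStr month
                let m := if PySem.Str.len m = 1 then "0" ++ m else m
                result ++ [PySem.Int.toStr year ++ m ++ day]) result) [] =
          (PySem.List.pyRange sy (ey + 1) 1).foldl (fun result y =>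
            result ++ (if y = sy then pvSeg y sm 13 day
              else if y = ey then pvSeg y 1 (em + 1) day
              else pvSeg y 1 13 day)) [] := by
        apply PySem.List.foldl_congr_mem
        intro acc y _
        rw [segA, segA, segA]
        split_ifs <;> rfl
      rw [hstep, PySem.List.foldl_append_eq_flatMap, List.nil_append, pvSpec]
      apply List.flatMap_congr
      intro y hy
      rw [PySem.List.mem_pyRange_one] at hy
      by_cases h1 : y = sy
      · rw [if_pos h1, if_pos h1, if_neg (by omega : ¬ y = ey)]
        norm_num
      · rw [if_neg h1, if_neg h1]
        by_cases h2 : y = ey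
        · rw [if_pos h2, if_pos h2]
        · rw [if_neg h2, if_neg h2]
          norm_num
    · have hr : PySem.List.pyRange sy (ey + 1) 1 = [] :=
        PySem.List.pyRange_one_eq_nil (by omega)
      rw [pvSpec, hr, List.flatMap_nil, List.foldl_nil]
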